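-- pv_equiv track=rewrite | github.com/ludifu/SunGather | SunGather/RegisterWriter.py | compact_updates
-- ===== SOURCE A (Python) =====
-- from collections import deque
--
-- def compact_updates(update_dict):
--     # update_dict contains key value pairs of register addresses and target
--     # values. Create and return a dictionary containing addresses as keys
--     # and a list of target values to write starting at the address.
--     # Rationale: The PyModbus can write a list of values to a starting
--     # address. Instead of one write operation per register this requires
--     # only one write operation per contiguous address area.
--     compacted_updates = {}
--
--     # To handle the addresses in ascending order, use a deque to be able to
--     # pop finished values from the left side.
--     addresses = deque(sorted([*update_dict]))
--
--     while len(addresses) > 0: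
--         adr = addresses.popleft()
--         compacted_updates[adr] = list()
--         compacted_updates[adr].append(update_dict.get(adr))
--         subs_adr = adr
--         while True:
--             try:
--                 # assume a subsequent address ...
--                 subs_adr += 1
--                 # ... and try to delete it from the addresses. Deleting a
--                 # non existing address will throw a ValueError, thus ending
--                 # the inner loop:
--                 del addresses[addresses.index(subs_adr)]
--                 # if deleting worked, then the address exists, append the
--                 # corresponding value to the list at the beginning address:
--                 compacted_updates[adr].append(update_dict.get(subs_adr))
--             except ValueError:
--                 break
--     return compacted_updates
-- ===== SOURCE B (Python) =====
-- def compact_updates(update_dict):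
--     # Sort the addresses once, then a single pass groups consecutive
--     # addresses (prev + 1) into runs: O(n log n) instead of A's repeated
--     # linear index/delete scans.
--     compacted = {}
--     start = None
--     prev = None
--     for adr in sorted(update_dict):
--         if prev is not None and adr == prev + 1:
--             compacted[start].append(update_dict.get(adr))
--         else:
--             start = adr
--             compacted[adr] = [update_dict.get(adr)]
--         prev = adr
--     return compacted
-- ===== Notes on version B (the rewrite author's own statement) =====
-- stated objective: faster
-- what changed: Replaced the deque with repeated list.index/del scans per successor address by one sort followed by a single linear pass that groups consecutive addresses into runs.
import Mathlib
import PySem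

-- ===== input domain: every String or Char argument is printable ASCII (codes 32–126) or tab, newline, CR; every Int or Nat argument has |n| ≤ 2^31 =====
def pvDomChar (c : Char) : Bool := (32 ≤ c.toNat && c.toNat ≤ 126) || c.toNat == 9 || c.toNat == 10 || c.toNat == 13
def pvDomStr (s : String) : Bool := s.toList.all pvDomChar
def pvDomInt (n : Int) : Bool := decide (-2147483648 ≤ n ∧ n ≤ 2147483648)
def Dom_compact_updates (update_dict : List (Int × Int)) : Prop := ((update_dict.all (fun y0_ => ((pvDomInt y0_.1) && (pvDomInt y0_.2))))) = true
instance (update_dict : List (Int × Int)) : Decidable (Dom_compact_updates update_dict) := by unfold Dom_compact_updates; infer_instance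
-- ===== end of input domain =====

-- B replaces A's per-address deque index/delete scans by one sort and a single
-- grouping pass (objective: faster).

-- ===== PORT A =====
-- Inner 'while True' loop: subs_adr += 1; try to delete it from addresses
-- (ValueError = index? none ends the loop), appending its value to the run.
-- 'fuel' only makes the recursion structural: each iteration deletes one
-- element, so fuel = length of the deque is never exhausted.
-- update_dict.get(k) is ported as getD k 0: every looked-up key comes from the
-- dict's own key list, so the default is never used.
def pvInnerA (d : PySem.Dict Int Int) (fuel : Nat) (addrs : List Int) (subs : Int)
    (acc : List Int) : List Int × List Int :=
  match fuel with
  | 0 => (addrs, acc)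
  | fuel + 1 =>
      match PySem.List.index? addrs (subs + 1) with
      | none => (addrs, acc)
      | some i =>
          pvInnerA d fuel (addrs.eraseIdx i) (subs + 1) (acc ++ [d.getD (subs + 1) 0])

-- Outer 'while len(addresses) > 0' loop: pop the smallest address, collect its
-- run with the inner loop, continue on what the inner loop left behind.
-- fuel = length of the deque again makes the recursion structural.
def pvOuterA (d : PySem.Dict Int Int) (fuel : Nat) (addrs : List Int) :
    List (Int × List Int) :=
  match fuel, addrs with
  | _, [] => []
  | 0, _ :: _ => []   -- never reached: fuel starts at the deque's length
  | fuel + 1, adr :: rest =>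
      let r := pvInnerA d rest.length rest adr [d.getD adr 0]
      (adr, r.2) :: pvOuterA d fuel r.1

def compact_updates (update_dict : List (Int × Int)) : List (Int × List Int) :=
  let d := PySem.Dict.ofList update_dict
  let addresses := PySem.List.sorted d.keys (fun x => x) false
  pvOuterA d addresses.length addresses

-- ===== PORT B =====
-- Single pass over the sorted keys: 'start' is the first address of the current
-- run, 'acc' its collected values; a key equal to prev+1 extends the run,
-- anything else closes it and opens a new one.
def pvRunsB (d : PySem.Dict Int Int) (start prev : Int) (acc : List Int) :
    List Int → List (Int × List Int)
  | [] => [(start, acc)]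
  | k :: ks =>
      if k = prev + 1 then pvRunsB d start k (acc ++ [d.getD k 0]) ks
      else (start, acc) :: pvRunsB d k k [d.getD k 0] ks

def compact_updates_alt (update_dict : List (Int × Int)) : List (Int × List Int) :=
  let d := PySem.Dict.ofList update_dict
  match PySem.List.sorted d.keys (fun x => x) false with
  | [] => []
  | k :: ks => pvRunsB d k k [d.getD k 0] ks

-- ===== PRECONDITION & SPEC =====
def Spec_compact_updates (update_dict : List (Int × Int)) (out : List (Int × List Int)) : Prop := out = compact_updates_alt update_dict
instance (update_dict : List (Int × Int)) (out : List (Int × List Int)) : Decidable (Spec_compact_updates update_dict out) := by unfold Spec_compact_updates; infer_instance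

-- ===== CLAIM (what is proved, stated in full; the proofs are below) =====
def Claim_equal_compact_updates : Prop := ∀ (update_dict : List (Int × Int)), Dom_compact_updates update_dict → Spec_compact_updates update_dict (compact_updates update_dict)

-- ===== LEMMAS AND PROOFS =====

-- On a strictly increasing list all of whose elements exceed subs (which is
-- exactly the state of A's sorted deque), A's inner+outer loops produce
-- B's grouping pass, for any sufficient fuel.
theorem pv_main (d : PySem.Dict Int Int) (ks : List Int) (hs : ks.Pairwise (· < ·)) :
    ∀ (fI fO : Nat) (subs : Int) (acc : List Int) (start : Int),
      ks.length ≤ fI → ks.length ≤ fO → (∀ x ∈ ks, subs < x) →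
      (start, (pvInnerA d fI ks subs acc).2) :: pvOuterA d fO (pvInnerA d fI ks subs acc).1
        = pvRunsB d start subs acc ks := by
  induction ks with
  | nil =>
      intro fI fO subs acc start _ _ _
      cases fI <;> cases fO <;>
        simp [pvInnerA, pvOuterA, pvRunsB, PySem.List.index?_eq_idxOf?]
  | cons k ks ih =>
      intro fI fO subs acc start hfI hfO hlt
      have hks : ∀ x ∈ ks, k < x := fun x hx => (List.pairwise_cons.mp hs).1 x hx
      have hs' : ks.Pairwise (· < ·) := (List.pairwise_cons.mp hs).2
      obtain ⟨fI', rfl⟩ : ∃ f, fI = f + 1 := ⟨fI - 1, by simp at hfI; omega⟩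
      obtain ⟨fO', rfl⟩ : ∃ f, fO = f + 1 := ⟨fO - 1, by simp at hfO; omega⟩
      by_cases hek : k = subs + 1
      · -- successor found at the front of the deque
        subst hek
        have hidx : PySem.List.index? ((subs + 1) :: ks) (subs + 1) = some 0 :=
          PySem.List.index?_cons_self (subs + 1) ks
        rw [pvInnerA, hidx]
        simp only [List.eraseIdx_zero, List.tail_cons]
        rw [ih hs' fI' (fO' + 1) (subs + 1) (acc ++ [d.getD (subs + 1) 0]) start
          (by simp only [List.length_cons] at hfI; omega)
          (by simp only [List.length_cons] at hfO; omega) hks, pvRunsB]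
        rw [if_pos rfl]
      · -- successor absent: close the run, recurse on the rest
        have hnot : subs + 1 ∉ (k :: ks) := by
          intro hmem
          rcases List.mem_cons.mp hmem with h | h
          · exact hek h.symm
          · have h1 := hlt k (List.mem_cons_self); have h2 := hks _ h; omega
        have hidx : PySem.List.index? (k :: ks) (subs + 1) = none :=
          (PySem.List.index?_eq_none_iff (k :: ks) (subs + 1)).mpr hnot
        rw [pvInnerA, hidx, pvRunsB]
        simp only [if_neg (fun h => hek h)]
        rw [pvOuterA.eq_def]
        simp only []
        rw [ih hs' ks.length fO' k [d.getD k 0] k (le_refl _)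
          (by simp only [List.length_cons] at hfO; omega) hks]

theorem pv_eq (update_dict : List (Int × Int)) :
    compact_updates update_dict = compact_updates_alt update_dict := by
  unfold compact_updates compact_updates_alt
  have hnd : (PySem.Dict.ofList update_dict).keys.Nodup :=
    PySem.Dict.nodup_keys_ofList update_dict
  set d := PySem.Dict.ofList update_dict with hd
  have hperm := PySem.List.sorted_perm d.keys (fun x => x) false
  have hnd' : (PySem.List.sorted d.keys (fun x => x) false).Nodup := hperm.nodup_iff.mpr hnd
  have hle := PySem.List.sorted_pairwise d.keys (fun x => x)
  have hlt : (PySem.List.sorted d.keys (fun x => x) false).Pairwise (· < ·) :=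
    (hle.and hnd').imp (fun h => lt_of_le_of_ne h.1 h.2)
  change pvOuterA d (PySem.List.sorted d.keys (fun x => x) false).length
      (PySem.List.sorted d.keys (fun x => x) false) =
    match PySem.List.sorted d.keys (fun x => x) false with
    | [] => []
    | k :: ks => pvRunsB d k k [d.getD k 0] ks
  cases h : PySem.List.sorted d.keys (fun x => x) false with
  | nil => rfl
  | cons k ks =>
      rw [h] at hlt
      rw [pvOuterA.eq_def]
      simp only []
      exact pv_main d ks (List.pairwise_cons.mp hlt).2 ks.length ks.length k [d.getD k 0] k
        (le_refl _) (le_refl _) (fun x hx => (List.pairwise_cons.mp hlt).1 x hx)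

-- ===== VERDICT (by name: the statement is the Claim_ definition above) =====
theorem compact_updates_spec : Claim_equal_compact_updates := by
  intro update_dict _
  unfold Spec_compact_updates
  exact pv_eq update_dict
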